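-- pv_equiv track=rewrite | github.com/kiggless/cscg2020 | eVMoji/dec.py | opcode_length
-- ===== SOURCE A (Python) =====
-- def opcode_length(op):
--     if 0 <= op < 128:
--         return 1
--
--     for i in range(2, 5):
--         if op & 128 >> i == 0:
--             return i
--
--     assert False
--     return -1
-- ===== SOURCE B (Python) =====
-- _T = [2, 2, 2, 2, 3, 3, 4, None]
--
-- def opcode_length(op):
--     if 0 <= op < 128:
--         return 1
--     i = _T[(op >> 3) & 7]
--     assert i is not None
--     return i
-- ===== Notes on version B (the rewrite author's own statement) =====
-- stated objective: idiomatic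
-- what changed: Replaces the mask-testing loop over range(2,5) with a single lookup in a precomputed 8-entry decode table indexed by bits 3-5 of the opcode ((op>>3)&7).
import Mathlib
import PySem

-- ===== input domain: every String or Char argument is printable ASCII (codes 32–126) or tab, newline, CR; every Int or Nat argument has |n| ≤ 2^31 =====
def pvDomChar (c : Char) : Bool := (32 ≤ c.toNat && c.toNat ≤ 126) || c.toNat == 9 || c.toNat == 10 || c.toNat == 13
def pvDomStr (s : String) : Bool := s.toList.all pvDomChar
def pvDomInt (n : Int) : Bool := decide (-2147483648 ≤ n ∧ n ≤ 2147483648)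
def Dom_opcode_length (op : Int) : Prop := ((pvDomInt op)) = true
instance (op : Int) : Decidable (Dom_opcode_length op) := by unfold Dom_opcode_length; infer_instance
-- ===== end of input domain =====

-- B replaces A's mask-testing loop by a single lookup in a precomputed 8-entry decode table
-- indexed by bits 3–5 of the opcode (idiomatic table-driven decode; same cost class).

-- ===== PORT A =====
-- Python A: guard 0 <= op < 128, then 'for i in range(2,5): if op & 128 >> i == 0: return i',
-- then 'assert False'. The first-match loop is the find? over pyRange 2 5 1; the unreachable
-- assert-False tail (where Python raises, excluded by Pre_) is the none branch.
def opcode_length (op : Int) : Int :=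
  if 0 ≤ op ∧ op < 128 then 1
  else
    match (PySem.List.pyRange 2 5 1).find? (fun i => PySem.Int.band op (128 >>> i.toNat) == 0) with
    | some i => i
    | none => -1  -- Python: assert False raises here; Pre_ excludes these inputs

-- ===== PORT B =====
def opcodeTable : List (Option Int) := [some 2, some 2, some 2, some 2, some 3, some 3, some 4, none]

def opcode_length_alt (op : Int) : Int :=
  if 0 ≤ op ∧ op < 128 then 1
  else
    match opcodeTable.getD (PySem.Int.band (op >>> (3 : Nat)) 7).toNat none with
    | some i => i
    | none => -1  -- Python: 'assert i is not None' raises here; Pre_ excludes these inputs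

-- ===== PRECONDITION & SPEC =====
-- Pre_ excludes exactly the inputs on which A's 'assert False' raises AssertionError
-- (op outside [0,128) with bits 3,4 and 5 all set, i.e. op % 64 ≥ 56); B raises there too.
def Pre_opcode_length (op : Int) : Prop := (0 ≤ op ∧ op < 128) ∨ op % 64 < 56
instance (op : Int) : Decidable (Pre_opcode_length op) := by unfold Pre_opcode_length; infer_instance

def pvWitness_opcode_length : Int := (130)

def Spec_opcode_length (op : Int) (out : Int) : Prop := out = opcode_length_alt op
instance (op : Int) (out : Int) : Decidable (Spec_opcode_length op out) := by unfold Spec_opcode_length; infer_instance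

-- ===== CLAIM (what is proved, stated in full; the proofs are below) =====
def Claim_equal_opcode_length : Prop := ∀ (op : Int), Dom_opcode_length op → Pre_opcode_length op → Spec_opcode_length op (opcode_length op)

-- ===== LEMMAS AND PROOFS =====

-- Nat facts: a single-bit mask reads one binary digit; the mask 7 is mod 8.
theorem pvNatAnd32 (t : Nat) : t &&& 32 = 32 * (t / 32 % 2) := by
  have h := Nat.and_two_pow t 5
  rw [Nat.testBit_eq_decide_div_mod_eq] at h
  by_cases hb : t / 32 % 2 = 1 <;> simp [hb] at h <;> omega

theorem pvNatAnd16 (t : Nat) : t &&& 16 = 16 * (t / 16 % 2) := by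
  have h := Nat.and_two_pow t 4
  rw [Nat.testBit_eq_decide_div_mod_eq] at h
  by_cases hb : t / 16 % 2 = 1 <;> simp [hb] at h <;> omega

theorem pvNatAnd8 (t : Nat) : t &&& 8 = 8 * (t / 8 % 2) := by
  have h := Nat.and_two_pow t 3
  rw [Nat.testBit_eq_decide_div_mod_eq] at h
  by_cases hb : t / 8 % 2 = 1 <;> simp [hb] at h <;> omega

theorem pvNatAnd7 (t : Nat) : t &&& 7 = t % 8 := by
  apply Nat.eq_of_testBit_eq; intro i
  rw [Nat.testBit_and, show (8:Nat) = 2 ^ 3 from rfl, show (7:Nat) = 2 ^ 3 - 1 from rfl,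
    Nat.testBit_mod_two_pow, Nat.testBit_two_pow_sub_one, Bool.and_comm]

-- Unfolding Python '&' by the sign of the left operand (mask nonnegative).
theorem pvBandPos (x c : Int) (hx : 0 ≤ x) (hc : 0 ≤ c) :
    PySem.Int.band x c = ((x.toNat &&& c.toNat : Nat) : Int) := PySem.Int.band_of_nonneg hx hc

theorem pvBandNeg (x c : Int) (hx : ¬ 0 ≤ x) (hc : 0 ≤ c) :
    PySem.Int.band x c = ((c.toNat - (c.toNat &&& (-x - 1).toNat) : Nat) : Int) := by
  rw [PySem.Int.band.eq_1, if_neg hx, if_pos hc]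

-- Python '&' against a single-bit mask, in terms of Euclidean mod (both signs of op).
theorem pvBand32 (x : Int) : PySem.Int.band x 32 = x % 64 - x % 32 := by
  by_cases hx : 0 ≤ x
  · rw [pvBandPos x 32 hx (by norm_num)]
    simp only [show (32 : Int).toNat = 32 from rfl]
    have h := pvNatAnd32 x.toNat; omega
  · rw [pvBandNeg x 32 hx (by norm_num)]
    simp only [show (32 : Int).toNat = 32 from rfl]
    rw [Nat.and_comm]
    have h := pvNatAnd32 ((-x - 1).toNat)
    omega

theorem pvBand16 (x : Int) : PySem.Int.band x 16 = x % 32 - x % 16 := by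
  by_cases hx : 0 ≤ x
  · rw [pvBandPos x 16 hx (by norm_num)]
    simp only [show (16 : Int).toNat = 16 from rfl]
    have h := pvNatAnd16 x.toNat; omega
  · rw [pvBandNeg x 16 hx (by norm_num)]
    simp only [show (16 : Int).toNat = 16 from rfl]
    rw [Nat.and_comm]
    have h := pvNatAnd16 ((-x - 1).toNat)
    omega

theorem pvBand8 (x : Int) : PySem.Int.band x 8 = x % 16 - x % 8 := by
  by_cases hx : 0 ≤ x
  · rw [pvBandPos x 8 hx (by norm_num)]
    simp only [show (8 : Int).toNat = 8 from rfl]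
    have h := pvNatAnd8 x.toNat; omega
  · rw [pvBandNeg x 8 hx (by norm_num)]
    simp only [show (8 : Int).toNat = 8 from rfl]
    rw [Nat.and_comm]
    have h := pvNatAnd8 ((-x - 1).toNat)
    omega

theorem pvBand7 (x : Int) : PySem.Int.band x 7 = x % 8 := by
  by_cases hx : 0 ≤ x
  · rw [pvBandPos x 7 hx (by norm_num)]
    simp only [show (7 : Int).toNat = 7 from rfl]
    have h := pvNatAnd7 x.toNat; omega
  · rw [pvBandNeg x 7 hx (by norm_num)]
    simp only [show (7 : Int).toNat = 7 from rfl]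
    rw [Nat.and_comm]
    have h := pvNatAnd7 ((-x - 1).toNat)
    omega

theorem pvShift3 (x : Int) : x >>> (3 : Nat) = x / 8 := by
  have h := Int.shiftRight_eq_div_pow x 3
  simpa using h

theorem pvRange245 : PySem.List.pyRange 2 5 1 = [2, 3, 4] := by decide

theorem opcode_length_spec : Claim_equal_opcode_length := by
  intro op _ hpre
  unfold Spec_opcode_length opcode_length opcode_length_alt
  by_cases hg : 0 ≤ op ∧ op < 128
  · simp [hg]
  · simp only [if_neg hg, pvRange245]
    have h56 : op % 64 < 56 := hpre.resolve_left hg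
    have hidx : (PySem.Int.band (op >>> (3 : Nat)) 7).toNat = ((op / 8) % 8).toNat := by
      rw [pvShift3, pvBand7]
    have h32 := pvBand32 op
    have h16 := pvBand16 op
    have h8 := pvBand8 op
    rcases (by omega : PySem.Int.band op 32 = 0 ∨ PySem.Int.band op 32 = 32) with hb5 | hb5 <;>
      rcases (by omega : PySem.Int.band op 16 = 0 ∨ PySem.Int.band op 16 = 16) with hb4 | hb4 <;>
      rcases (by omega : PySem.Int.band op 8 = 0 ∨ PySem.Int.band op 8 = 8) with hb3 | hb3
    · have hk : ((op / 8) % 8).toNat = 0 := by omega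
      simp [List.find?, hb5, hidx, hk, opcodeTable]
    · have hk : ((op / 8) % 8).toNat = 1 := by omega
      simp [List.find?, hb5, hidx, hk, opcodeTable]
    · have hk : ((op / 8) % 8).toNat = 2 := by omega
      simp [List.find?, hb5, hidx, hk, opcodeTable]
    · have hk : ((op / 8) % 8).toNat = 3 := by omega
      simp [List.find?, hb5, hidx, hk, opcodeTable]
    · have hk : ((op / 8) % 8).toNat = 4 := by omega
      simp [List.find?, hb5, hb4, hidx, hk, opcodeTable]
    · have hk : ((op / 8) % 8).toNat = 5 := by omega
      simp [List.find?, hb5, hb4, hidx, hk, opcodeTable]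
    · have hk : ((op / 8) % 8).toNat = 6 := by omega
      simp [List.find?, hb5, hb4, hb3, hidx, hk, opcodeTable]
    · omega
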